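-- pv_equiv track=rewrite | github.com/anti-fragile-study/algorithm-study | week-9/dahyen0o/전력망을-둘로-나누기.py | bfs
-- ===== SOURCE A (Python) =====
-- from collections import defaultdict, deque
--
-- def bfs(wires, except_wire):
--     cnt = 0
--     checked = defaultdict(int)
--     checked[tuple(except_wire)] = 1
--     queue = [1]
--     queue = deque(queue)
--
--     while queue:
--         curr = queue.popleft()
--         cnt += 1
--         for wire in wires:
--             if wire[0] == curr and checked[tuple(wire)] == 0:
--                 checked[tuple(wire)] = 1
--                 queue.append(wire[1])
--             if wire[1] == curr and checked[tuple(wire)] == 0: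
--                 checked[tuple(wire)] = 1
--                 queue.append(wire[0])
--
--     return cnt
-- ===== SOURCE B (Python) =====
-- def bfs(wires, except_wire):
--     ex = tuple(except_wire)
--     # distinct edge tuples, except-wire removed
--     seen = set()
--     edges = []
--     for w in wires:
--         t = tuple(w)
--         if t != ex and t not in seen:
--             seen.add(t)
--             edges.append(t)
--     # saturate the set of nodes connected to 1
--     reach = {1}
--     while True:
--         new = set(reach)
--         for t in edges:
--             if t[0] in reach or t[1] in reach:
--                 new.add(t[0])
--                 new.add(t[1])
--         if len(new) == len(reach):
--             break
--         reach = new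
--     # 1 (for node 1) + every edge touching the component of 1
--     return 1 + sum(1 for t in edges if t[0] in reach or t[1] in reach)
-- ===== Notes on version B (the rewrite author's own statement) =====
-- stated objective: alternative
-- what changed: A rescans the whole wire list once per queue pop (and keys a dict by edge) to count pops; B dedupes the wires once, grows the set of nodes connected to node 1 by whole-list saturation rounds until a fixpoint, and returns 1 plus the number of distinct non-excluded edges touching that set.
import Mathlib
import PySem

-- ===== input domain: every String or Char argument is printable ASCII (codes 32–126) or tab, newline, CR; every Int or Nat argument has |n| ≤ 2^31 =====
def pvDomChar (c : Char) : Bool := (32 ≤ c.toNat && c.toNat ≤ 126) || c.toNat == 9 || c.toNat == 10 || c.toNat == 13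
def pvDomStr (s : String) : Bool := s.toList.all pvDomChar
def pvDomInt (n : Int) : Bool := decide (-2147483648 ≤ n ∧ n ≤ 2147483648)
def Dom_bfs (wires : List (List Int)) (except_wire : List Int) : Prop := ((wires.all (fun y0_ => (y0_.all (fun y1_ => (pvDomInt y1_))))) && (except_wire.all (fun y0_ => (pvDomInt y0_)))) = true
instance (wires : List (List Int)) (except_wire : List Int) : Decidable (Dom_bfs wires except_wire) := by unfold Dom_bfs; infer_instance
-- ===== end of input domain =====

-- B replaces A's pop-counting queue loop (one full rescan of `wires` per pop) by a dedup
-- pass plus a round-based saturation of the component of node 1, then counts the edges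
-- touching that component; a structurally different algorithm of similar cost.

-- wire[0] / wire[1]; exact under Pre_bfs (every wire has length ≥ 2, so no IndexError)
def pvE0 (w : List Int) : Int := PySem.List.pyGetD w 0 0
def pvE1 (w : List Int) : Int := PySem.List.pyGetD w 1 0

-- ===== PORT A =====
-- body of `for wire in wires:` (two sequential ifs; the second reads the updated dict)
def pvStepA (curr : Int) (st : PySem.Dict (List Int) Int × List Int) (wire : List Int) :
    PySem.Dict (List Int) Int × List Int :=
  let st1 := if pvE0 wire == curr && st.1.getD wire 0 == 0
             then (st.1.insert wire 1, st.2 ++ [pvE1 wire]) else st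
  if pvE1 wire == curr && st1.1.getD wire 0 == 0
  then (st1.1.insert wire 1, st1.2 ++ [pvE0 wire]) else st1

-- number of wires still unmarked (termination measure only)
def pvUnm (wires : List (List Int)) (c : PySem.Dict (List Int) Int) : Nat :=
  wires.countP (fun w => c.getD w 0 == 0)

-- ---------- A's inner loop, case analysis and fold facts ----------
theorem pvStepA_cases (curr : Int) (c : PySem.Dict (List Int) Int) (q : List Int)
    (w : List Int) :
    (pvStepA curr (c, q) w = (c, q) ∧ ((pvE0 w ≠ curr ∧ pvE1 w ≠ curr) ∨ c.getD w 0 ≠ 0))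
    ∨ (c.getD w 0 = 0 ∧ (pvE0 w = curr ∨ pvE1 w = curr)
        ∧ ∃ x, ((x = pvE1 w ∧ pvE0 w = curr) ∨ (x = pvE0 w ∧ pvE1 w = curr))
            ∧ pvStepA curr (c, q) w = (c.insert w 1, q ++ [x])) := by
  unfold pvStepA
  by_cases h1 : (pvE0 w == curr && c.getD w 0 == 0) = true
  · have h1' : pvE0 w = curr ∧ c.getD w 0 = 0 := by simpa using h1
    rw [if_pos h1]
    have h2 : ((pvE1 w == curr && (c.insert w 1, q ++ [pvE1 w]).1.getD w 0 == 0)) = false := by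
      simp [PySem.Dict.getD_insert]
    right
    refine ⟨h1'.2, Or.inl h1'.1, pvE1 w, Or.inl ⟨rfl, h1'.1⟩, ?_⟩
    simp only [h2, Bool.false_eq_true, if_false]
  · rw [if_neg h1]
    by_cases h2 : (pvE1 w == curr && c.getD w 0 == 0) = true
    · have h2' : pvE1 w = curr ∧ c.getD w 0 = 0 := by simpa using h2
      rw [if_pos h2]
      exact Or.inr ⟨h2'.2, Or.inr h2'.1, pvE0 w, Or.inr ⟨rfl, h2'.1⟩, rfl⟩
    · rw [if_neg h2]
      left
      refine ⟨rfl, ?_⟩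
      simp only [Bool.and_eq_true, beq_iff_eq, not_and] at h1 h2
      by_cases hm : c.getD w 0 = 0
      · exact Or.inl ⟨fun he => (h1 he) hm, fun he => (h2 he) hm⟩
      · exact Or.inr hm

theorem pvCountP_if_eq {α : Type} [DecidableEq α] [BEq α] [LawfulBEq α] (l : List α) (w : α) (p : α → Bool)
    (hw : p w = true) :
    l.countP p = l.countP (fun t => if t = w then false else p t) + l.count w := by
  induction l with
  | nil => simp
  | cons a l ih =>
    by_cases haw : a = w
    · subst haw
      simp [List.countP_cons, List.count_cons, hw, ih]
      omega
    · by_cases hpa : p a = true <;>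
        simp [List.countP_cons, List.count_cons, haw, hpa, ih] <;> omega

-- marking one unmarked wire w: unmarked count drops by the number of occurrences of w
theorem pvCountPD_insert (E : List (List Int)) (c : PySem.Dict (List Int) Int)
    (w : List Int) (hw : c.getD w 0 = 0) :
    E.countP (fun t => ((c.insert w 1).getD t 0 == 0)) + E.count w
      = E.countP (fun t => (c.getD t 0 == 0)) := by
  have h := pvCountP_if_eq E w (fun t => (c.getD t 0 == 0)) (by simp [hw])
  rw [h]
  have heq : E.countP (fun t => ((c.insert w 1).getD t 0 == 0))
      = E.countP (fun t => if t = w then false else (c.getD t 0 == 0)) := by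
    apply List.countP_congr
    intro t _
    rw [PySem.Dict.getD_insert]
    by_cases htw : t = w <;> simp [htw]
  rw [heq]

-- cited by `decreasing_by` of pvLoopA
theorem pvFoldA_measure (curr : Int) (wires : List (List Int)) :
    ∀ (l : List (List Int)) (c : PySem.Dict (List Int) Int) (q : List Int),
      (∀ w ∈ l, w ∈ wires) →
      (l.foldl (pvStepA curr) (c, q)).2.length + pvUnm wires (l.foldl (pvStepA curr) (c, q)).1
        ≤ q.length + pvUnm wires c
      ∧ pvUnm wires (l.foldl (pvStepA curr) (c, q)).1 ≤ pvUnm wires c := by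
  intro l
  induction l with
  | nil => intro c q _; simp
  | cons w l ih =>
    intro c q hl
    have hlw : w ∈ wires := hl w List.mem_cons_self
    have hl' : ∀ u ∈ l, u ∈ wires := fun u hu => hl u (List.mem_cons_of_mem _ hu)
    simp only [List.foldl_cons]
    rcases pvStepA_cases curr c q w with ⟨heq, _⟩ | ⟨hw, _, x, _, heq⟩
    · rw [heq]; exact ih c q hl'
    · rw [heq]
      have hcount := pvCountPD_insert wires c w hw
      have hcnt1 : 1 ≤ wires.count w := List.one_le_count_iff.2 hlw
      have hih := ih (c.insert w 1) (q ++ [x]) hl'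
      have h1 := hih.1
      have h2 := hih.2
      unfold pvUnm at *
      constructor
      · simp only [List.length_append, List.length_cons, List.length_singleton, List.length_nil] at h1 ⊢
        omega
      · omega

-- `while queue:` of A
def pvLoopA (wires : List (List Int)) (c : PySem.Dict (List Int) Int)
    (queue : List Int) (cnt : Int) : Int :=
  match queue with
  | [] => cnt
  | curr :: rest =>
    let st := wires.foldl (pvStepA curr) (c, rest)
    pvLoopA wires st.1 st.2 (cnt + 1)
termination_by pvUnm wires c * (wires.length + 1) + queue.length
decreasing_by
  simp only [List.foldl_attach]
  have h := pvFoldA_measure curr wires wires c rest (fun w hw => hw)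
  have h1 := h.1
  have h2 := h.2
  have h3 : pvUnm wires (wires.foldl (pvStepA curr) (c, rest)).1 * wires.length
      ≤ pvUnm wires c * wires.length := Nat.mul_le_mul_right _ h2
  simp only [List.length_cons, Nat.mul_add, Nat.mul_one]
  omega

def bfs (wires : List (List Int)) (except_wire : List Int) : Int :=
  -- cnt = 0; checked = defaultdict(int); checked[tuple(except_wire)] = 1; queue = deque([1])
  pvLoopA wires (PySem.Dict.empty.insert except_wire 1) [1] 0

-- ===== PORT B =====
-- first loop of B: distinct wire tuples, except_wire dropped (seen : set, edges : list)
def pvDedup (wires : List (List Int)) (ex : List Int) :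
    PySem.Set (List Int) × List (List Int) :=
  wires.foldl
    (fun st w =>
      if w != ex && !(PySem.Set.contains st.1 w) then (PySem.Set.add st.1 w, st.2 ++ [w]) else st)
    (PySem.Set.empty, [])

-- one pass `new = set(reach); for t in edges: …` (set(reach): copying an immutable value = itself)
def pvGrow (reach : PySem.Set Int) (edges : List (List Int)) : PySem.Set Int :=
  edges.foldl
    (fun n t =>
      if PySem.Set.contains reach (pvE0 t) || PySem.Set.contains reach (pvE1 t)
      then PySem.Set.add (PySem.Set.add n (pvE0 t)) (pvE1 t) else n)
    reach

theorem pvCountP_lt {α : Type} (l : List α) (p q : α → Bool)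
    (himp : ∀ x ∈ l, p x = true → q x = true)
    (x : α) (hx : x ∈ l) (hpx : p x = false) (hqx : q x = true) :
    l.countP p < l.countP q := by
  induction l with
  | nil => simp at hx
  | cons a l ih =>
    have hmono : l.countP p ≤ l.countP q :=
      List.countP_mono_left (fun x hx hpx => himp x (List.mem_cons_of_mem a hx) hpx)
    rcases List.mem_cons.1 hx with rfl | hx'
    · simp [List.countP_cons, hpx, hqx]; omega
    · have := ih (fun x hx hpx => himp x (List.mem_cons_of_mem a hx) hpx) hx'
      by_cases hpa : p a = true
      · have hqa := himp a List.mem_cons_self hpa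
        simp [List.countP_cons, hpa, hqa]; omega
      · simp only [Bool.not_eq_true] at hpa
        by_cases hqa : q a = true <;> simp [List.countP_cons, hpa, hqa] <;> omega

theorem pvGrow_append (reach : PySem.Set Int) (edges : List (List Int)) :
    ∃ app, pvGrow reach edges = reach ++ app
      ∧ ∀ x ∈ app, x ∈ edges.flatMap (fun t => [pvE0 t, pvE1 t]) ∧ x ∉ reach := by
  have hadd2 : ∀ (n : PySem.Set Int) (a b : Int),
      ∃ d, PySem.Set.add (PySem.Set.add n a) b = n ++ d
        ∧ ∀ x ∈ d, (x = a ∨ x = b) ∧ x ∉ n := by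
    intro n a b
    by_cases ha : a ∈ n
    · rw [PySem.Set.add_of_mem ha]
      by_cases hb : b ∈ n
      · exact ⟨[], by simp [PySem.Set.add_of_mem hb]⟩
      · exact ⟨[b], by simp [PySem.Set.add_of_not_mem hb, hb]⟩
    · rw [PySem.Set.add_of_not_mem ha]
      by_cases hb : b ∈ n ++ [a]
      · exact ⟨[a], by simp [PySem.Set.add_of_mem hb, ha]⟩
      · have hbn : b ∉ n := fun h => hb (by simp [h])
        exact ⟨[a, b], by rw [PySem.Set.add_of_not_mem hb]; simp [ha, hbn]⟩
  have haux : ∀ (l : List (List Int)) (n : PySem.Set Int),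
      ∃ app, (l.foldl
          (fun n t =>
            if PySem.Set.contains reach (pvE0 t) || PySem.Set.contains reach (pvE1 t)
            then PySem.Set.add (PySem.Set.add n (pvE0 t)) (pvE1 t) else n) n) = n ++ app
        ∧ ∀ x ∈ app, x ∈ l.flatMap (fun t => [pvE0 t, pvE1 t]) ∧ x ∉ n := by
    intro l
    induction l with
    | nil => intro n; exact ⟨[], by simp⟩
    | cons t rest ih =>
      intro n
      simp only [List.foldl_cons]
      by_cases hc : (PySem.Set.contains reach (pvE0 t) || PySem.Set.contains reach (pvE1 t)) = true
      · rw [if_pos hc]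
        obtain ⟨d, hd, hdmem⟩ := hadd2 n (pvE0 t) (pvE1 t)
        rw [hd]
        obtain ⟨app, happ, happmem⟩ := ih (n ++ d)
        refine ⟨d ++ app, by rw [happ, List.append_assoc], ?_⟩
        intro x hx
        rcases List.mem_append.1 hx with hx | hx
        · obtain ⟨hor, hnn⟩ := hdmem x hx
          exact ⟨by simp [List.flatMap_cons]; tauto, hnn⟩
        · obtain ⟨hm, hnn⟩ := happmem x hx
          refine ⟨by simp [List.flatMap_cons]; right; right; simpa using hm, fun hxn => hnn (by simp [hxn])⟩
      · rw [if_neg hc]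
        obtain ⟨app, happ, happmem⟩ := ih n
        refine ⟨app, happ, fun x hx => ⟨?_, (happmem x hx).2⟩⟩
        simp [List.flatMap_cons]
        right; right
        simpa using (happmem x hx).1
  exact haux edges reach

-- ---------- pvSat properties ----------
-- cited by `decreasing_by` of pvSat
theorem pvGrow_measure (reach : PySem.Set Int) (edges : List (List Int)) :
    (pvGrow reach edges).length ≠ reach.length →
    (PySem.Set.update (pvGrow reach edges) (edges.flatMap (fun t => [pvE0 t, pvE1 t]))).length
        - (pvGrow reach edges).length
      < (PySem.Set.update reach (edges.flatMap (fun t => [pvE0 t, pvE1 t]))).length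
        - reach.length := by
  intro hne
  obtain ⟨app, happ, happmem⟩ := pvGrow_append reach edges
  set ends := edges.flatMap (fun t => [pvE0 t, pvE1 t]) with hends
  have hμ : ∀ s : PySem.Set Int,
      (PySem.Set.update s ends).length - s.length
        = (PySem.Set.ofList ends).countP (fun y => !(PySem.Set.contains s y)) := by
    intro s
    rw [PySem.Set.update_eq_append_filter]
    simp [List.countP_eq_length_filter]
  rw [hμ, hμ]
  have happne : app ≠ [] := by
    intro h; subst h; simp at happ; rw [happ] at hne; exact hne rfl
  obtain ⟨x, xs, rfl⟩ := List.exists_cons_of_ne_nil happne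
  have hx := happmem x List.mem_cons_self
  refine pvCountP_lt _ _ _ ?_ x ?_ ?_ ?_
  · intro y _ hy
    simp only [Bool.not_eq_true', ← Bool.not_eq_true] at hy ⊢
    intro hcy
    apply hy
    have : y ∈ reach := (PySem.Set.contains_iff _ _).1 (by simpa using hcy)
    exact (PySem.Set.contains_iff _ _).2 (by rw [happ]; simp [this])
  · rw [PySem.Set.mem_ofList]; exact hx.1
  · have hxg : x ∈ pvGrow reach edges := by rw [happ]; simp
    simpa using hxg
  · have : x ∉ reach := hx.2
    simp only [Bool.not_eq_true']
    cases hcx : PySem.Set.contains reach x with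
    | false => simp
    | true => exact absurd ((PySem.Set.contains_iff _ _).1 hcx) this

-- `while True:` of B
def pvSat (edges : List (List Int)) (reach : PySem.Set Int) : PySem.Set Int :=
  let new := pvGrow reach edges
  if new.length == reach.length then reach else pvSat edges new
termination_by
  (PySem.Set.update reach (edges.flatMap (fun t => [pvE0 t, pvE1 t]))).length - reach.length
decreasing_by
  rename_i h
  exact pvGrow_measure reach edges (by simpa using h)

def bfs_alt (wires : List (List Int)) (except_wire : List Int) : Int :=
  let edges := (pvDedup wires except_wire).2
  let reach := pvSat edges (PySem.Set.ofList [1])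
  1 + (edges.countP
        (fun t => PySem.Set.contains reach (pvE0 t) || PySem.Set.contains reach (pvE1 t)) : Int)

-- ===== PRECONDITION & SPEC =====
-- Pre_: every wire has at least two entries; on any shorter wire the Python A raises
-- IndexError (wire[0] / wire[1]) at the first pop, so those inputs are excluded.
def Pre_bfs (wires : List (List Int)) (except_wire : List Int) : Prop :=
  ∀ w ∈ wires, 2 ≤ w.length
instance (wires : List (List Int)) (except_wire : List Int) : Decidable (Pre_bfs wires except_wire) := by
  unfold Pre_bfs; infer_instance

def pvWitness_bfs : List (List Int) × List Int := ([[1, 2], [2, 3], [4, 5]], [1, 2])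

def Spec_bfs (wires : List (List Int)) (except_wire : List Int) (out : Int) : Prop := out = bfs_alt wires except_wire
instance (wires : List (List Int)) (except_wire : List Int) (out : Int) : Decidable (Spec_bfs wires except_wire out) := by unfold Spec_bfs; infer_instance

-- ===== CLAIM (what is proved, stated in full; the proofs are below) =====
def Claim_equal_bfs : Prop := ∀ (wires : List (List Int)) (except_wire : List Int), Dom_bfs wires except_wire → Pre_bfs wires except_wire → Spec_bfs wires except_wire (bfs wires except_wire)

-- ===== LEMMAS AND PROOFS =====

-- ---------- generic counting helpers ----------
theorem pvCountP_split {α : Type} (l : List α) (p q : α → Bool)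
    (h : ∀ x ∈ l, q x = true → p x = true) :
    l.countP p = l.countP q + l.countP (fun x => p x && !q x) := by
  induction l with
  | nil => simp
  | cons a l ih =>
    have ih' := ih (fun x hx => h x (List.mem_cons_of_mem a hx))
    have ha := h a List.mem_cons_self
    by_cases hq : q a = true
    · simp [List.countP_cons, hq, ha hq, ih']
      omega
    · simp only [Bool.not_eq_true] at hq
      by_cases hp : p a = true <;>
        simp [List.countP_cons, hq, hp, ih'] <;> omega

-- ---------- dedup (B's first loop) ----------
theorem pvDedup_aux (ex : List Int) :
    ∀ (l : List (List Int)) (s : PySem.Set (List Int)) (e : List (List Int)),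
      e.Nodup → (∀ t, t ∈ s ↔ t ∈ e) →
      (l.foldl (fun st w =>
          if w != ex && !(PySem.Set.contains st.1 w)
          then (PySem.Set.add st.1 w, st.2 ++ [w]) else st) (s, e)).2.Nodup
      ∧ (∀ t, t ∈ (l.foldl (fun st w =>
          if w != ex && !(PySem.Set.contains st.1 w)
          then (PySem.Set.add st.1 w, st.2 ++ [w]) else st) (s, e)).2
            ↔ t ∈ e ∨ (t ∈ l ∧ t ≠ ex))
      ∧ (∀ t, t ∈ (l.foldl (fun st w =>
          if w != ex && !(PySem.Set.contains st.1 w)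
          then (PySem.Set.add st.1 w, st.2 ++ [w]) else st) (s, e)).1
            ↔ t ∈ e ∨ (t ∈ l ∧ t ≠ ex)) := by
  intro l
  induction l with
  | nil => intro s e hnd hse; simp [hse, hnd]
  | cons w l ih =>
    intro s e hnd hse
    simp only [List.foldl_cons]
    by_cases hcond : (w != ex && !(PySem.Set.contains s w)) = true
    · simp only [hcond, if_pos]
      have hc : w ≠ ex ∧ w ∉ s := by simpa using hcond
      have hwex : w ≠ ex := hc.1
      have hws : w ∉ s := hc.2
      have hwe : w ∉ e := fun h => hws ((hse w).2 h)
      have h2 := ih (PySem.Set.add s w) (e ++ [w])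
        (by simp [List.nodup_append, hnd]; exact fun a ha haw => hwe (haw ▸ ha))
        (by intro t; rw [PySem.Set.mem_add]; simp [hse])
      have hmemiff : ∀ (t : List Int),
          (t ∈ e ++ [w] ∨ (t ∈ l ∧ t ≠ ex)) ↔ (t ∈ e ∨ (t ∈ w :: l ∧ t ≠ ex)) := by
        intro t
        simp only [List.mem_append, List.mem_singleton, List.mem_cons]
        by_cases htw : t = w
        · subst htw; simp [hwex]
        · simp [htw]
      exact ⟨h2.1, fun t => by rw [h2.2.1 t]; exact hmemiff t,
             fun t => by rw [h2.2.2 t]; exact hmemiff t⟩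
    · simp only [Bool.not_eq_true] at hcond
      simp only [hcond, Bool.false_eq_true, if_false]
      have h2 := ih s e hnd hse
      have hcase : w = ex ∨ w ∈ s := by
        have hc := hcond
        simp at hc
        by_cases hb : w = ex
        · exact Or.inl hb
        · exact Or.inr (hc hb)
      have hmemiff : ∀ (t : List Int),
          (t ∈ e ∨ (t ∈ l ∧ t ≠ ex)) ↔ (t ∈ e ∨ (t ∈ w :: l ∧ t ≠ ex)) := by
        intro t
        simp only [List.mem_cons]
        by_cases htw : t = w
        · subst htw
          rcases hcase with rfl | hw
          · simp
          · have := (hse t).1 hw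
            simp [this]
        · simp [htw]
      exact ⟨h2.1, fun t => by rw [h2.2.1 t]; exact hmemiff t,
             fun t => by rw [h2.2.2 t]; exact hmemiff t⟩

theorem pvDedup_spec (wires : List (List Int)) (ex : List Int) :
    ((pvDedup wires ex).2.Nodup)
    ∧ (∀ t, t ∈ (pvDedup wires ex).2 ↔ t ∈ wires ∧ t ≠ ex) := by
  have h := pvDedup_aux ex wires PySem.Set.empty [] (by simp) (by simp [PySem.Set.empty])
  refine ⟨h.1, fun t => ?_⟩
  have ht := h.2.1 t
  simpa [pvDedup] using ht

-- ---------- pvGrow membership ----------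
theorem pvGrow_mem_aux (reach : PySem.Set Int) :
    ∀ (edges : List (List Int)) (n : PySem.Set Int) (y : Int),
      (y ∈ edges.foldl
        (fun n t =>
          if PySem.Set.contains reach (pvE0 t) || PySem.Set.contains reach (pvE1 t)
          then PySem.Set.add (PySem.Set.add n (pvE0 t)) (pvE1 t) else n) n
        ↔ y ∈ n ∨ ∃ t ∈ edges,
            (pvE0 t ∈ reach ∨ pvE1 t ∈ reach) ∧ (y = pvE0 t ∨ y = pvE1 t)) := by
  intro edges
  induction edges with
  | nil => intro n y; simp
  | cons t rest ih =>
    intro n y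
    simp only [List.foldl_cons]
    by_cases hc : (PySem.Set.contains reach (pvE0 t) || PySem.Set.contains reach (pvE1 t)) = true
    · have hcm : pvE0 t ∈ reach ∨ pvE1 t ∈ reach := by
        rcases Bool.or_eq_true_iff.1 hc with h | h
        · exact Or.inl ((PySem.Set.contains_iff _ _).1 h)
        · exact Or.inr ((PySem.Set.contains_iff _ _).1 h)
      rw [if_pos hc, ih]
      rw [PySem.Set.mem_add, PySem.Set.mem_add]
      constructor
      · rintro (((h | h) | h) | ⟨u, hu, hcu, hy⟩)
        · exact Or.inl h
        · exact Or.inr ⟨t, List.mem_cons_self, hcm, Or.inl h⟩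
        · exact Or.inr ⟨t, List.mem_cons_self, hcm, Or.inr h⟩
        · exact Or.inr ⟨u, List.mem_cons_of_mem _ hu, hcu, hy⟩
      · rintro (h | ⟨u, hu, hcu, hy⟩)
        · exact Or.inl (Or.inl (Or.inl h))
        · rcases List.mem_cons.1 hu with rfl | hu'
          · rcases hy with rfl | rfl
            · exact Or.inl (Or.inl (Or.inr rfl))
            · exact Or.inl (Or.inr rfl)
          · exact Or.inr ⟨u, hu', hcu, hy⟩
    · have hcm : ¬(pvE0 t ∈ reach ∨ pvE1 t ∈ reach) := by
        rintro (h | h)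
        · exact hc (by simp; exact Or.inl h)
        · exact hc (by simp; exact Or.inr h)
      rw [if_neg hc, ih]
      constructor
      · rintro (h | ⟨u, hu, hcu, hy⟩)
        · exact Or.inl h
        · exact Or.inr ⟨u, List.mem_cons_of_mem _ hu, hcu, hy⟩
      · rintro (h | ⟨u, hu, hcu, hy⟩)
        · exact Or.inl h
        · rcases List.mem_cons.1 hu with rfl | hu'
          · exact absurd hcu hcm
          · exact Or.inr ⟨u, hu', hcu, hy⟩

theorem pvGrow_mem (reach : PySem.Set Int) (edges : List (List Int)) (y : Int) :
    y ∈ pvGrow reach edges ↔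
      y ∈ reach ∨ ∃ t ∈ edges,
        (pvE0 t ∈ reach ∨ pvE1 t ∈ reach) ∧ (y = pvE0 t ∨ y = pvE1 t) := by
  exact pvGrow_mem_aux reach edges reach y

theorem pvSat_subset (edges : List (List Int)) (reach : PySem.Set Int) :
    ∀ x ∈ reach, x ∈ pvSat edges reach := by
  induction reach using pvSat.induct (edges := edges) with
  | case1 reach new h =>
    rw [pvSat, if_pos h]
    exact fun x hx => hx
  | case2 reach new h ih =>
    rw [pvSat, if_neg h]
    intro x hx
    apply ih
    obtain ⟨app, happ, _⟩ := pvGrow_append reach edges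
    show x ∈ pvGrow reach edges
    rw [happ]
    simp [hx]

theorem pvSat_closed (edges : List (List Int)) (reach : PySem.Set Int) :
    ∀ t ∈ edges,
      (pvE0 t ∈ pvSat edges reach ∨ pvE1 t ∈ pvSat edges reach) →
      pvE0 t ∈ pvSat edges reach ∧ pvE1 t ∈ pvSat edges reach := by
  induction reach using pvSat.induct (edges := edges) with
  | case1 reach new h =>
    rw [pvSat, if_pos h]
    -- at the fixpoint the grown set IS reach
    have hfix : pvGrow reach edges = reach := by
      obtain ⟨app, happ, _⟩ := pvGrow_append reach edges
      have hlen : (pvGrow reach edges).length = reach.length := by simpa using h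
      rw [happ] at hlen ⊢
      have : app = [] := by
        have := List.length_append (as := reach) (bs := app)
        rw [this] at hlen
        exact List.eq_nil_of_length_eq_zero (by omega)
      simp [this]
    intro t ht hmem
    have h0 : pvE0 t ∈ pvGrow reach edges :=
      (pvGrow_mem reach edges _).2 (Or.inr ⟨t, ht, hmem, Or.inl rfl⟩)
    have h1 : pvE1 t ∈ pvGrow reach edges :=
      (pvGrow_mem reach edges _).2 (Or.inr ⟨t, ht, hmem, Or.inr rfl⟩)
    rw [hfix] at h0 h1
    exact ⟨h0, h1⟩
  | case2 reach new h ih =>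
    rw [pvSat, if_neg h]
    exact ih

theorem pvSat_min (edges : List (List Int)) (reach : PySem.Set Int) (S : Int → Prop)
    (h0 : ∀ x ∈ reach, S x)
    (hcl : ∀ t ∈ edges, (S (pvE0 t) ∨ S (pvE1 t)) → S (pvE0 t) ∧ S (pvE1 t)) :
    ∀ x ∈ pvSat edges reach, S x := by
  induction reach using pvSat.induct (edges := edges) with
  | case1 reach new hfix =>
    rw [pvSat, if_pos hfix]
    exact h0
  | case2 reach new hne ih =>
    rw [pvSat, if_neg hne]
    apply ih
    intro x hx
    rcases (pvGrow_mem reach edges x).1 hx with hx | ⟨t, ht, hcond, hy⟩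
    · exact h0 x hx
    · have hS : S (pvE0 t) ∨ S (pvE1 t) := by
        rcases hcond with hc | hc
        · exact Or.inl (h0 _ hc)
        · exact Or.inr (h0 _ hc)
      rcases hy with rfl | rfl
      · exact (hcl t ht hS).1
      · exact (hcl t ht hS).2

-- all facts about one full scan of `wires` (l generalizes), proved in one induction
theorem pvFoldA_spec (curr : Int) (E : List (List Int)) (hE : E.Nodup) :
    ∀ (l : List (List Int)) (c : PySem.Dict (List Int) Int) (q : List Int),
      (∀ w ∈ l, c.getD w 0 = 0 → w ∈ E) →
      -- (1) queue only grows
      (∀ x ∈ q, x ∈ (l.foldl (pvStepA curr) (c, q)).2)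
      -- (2) marks only grow
      ∧ (∀ t, c.getD t 0 ≠ 0 → (l.foldl (pvStepA curr) (c, q)).1.getD t 0 ≠ 0)
      -- (3) new marks: in l, incident to curr, were unmarked, endpoints accounted for
      ∧ (∀ t, (l.foldl (pvStepA curr) (c, q)).1.getD t 0 ≠ 0 → c.getD t 0 ≠ 0 ∨
            (t ∈ l ∧ (pvE0 t = curr ∨ pvE1 t = curr) ∧ c.getD t 0 = 0
              ∧ (pvE0 t = curr ∨ pvE0 t ∈ (l.foldl (pvStepA curr) (c, q)).2)
              ∧ (pvE1 t = curr ∨ pvE1 t ∈ (l.foldl (pvStepA curr) (c, q)).2)))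
      -- (4) after the scan every wire of l incident to curr is marked
      ∧ (∀ w ∈ l, (pvE0 w = curr ∨ pvE1 w = curr) →
            (l.foldl (pvStepA curr) (c, q)).1.getD w 0 ≠ 0)
      -- (5) each queue entry is old or an endpoint of a new mark
      ∧ (∀ x ∈ (l.foldl (pvStepA curr) (c, q)).2, x ∈ q ∨
            ∃ t, (l.foldl (pvStepA curr) (c, q)).1.getD t 0 ≠ 0 ∧ c.getD t 0 = 0 ∧ t ∈ l
              ∧ (pvE0 t = curr ∨ pvE1 t = curr) ∧ (x = pvE0 t ∨ x = pvE1 t))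
      -- (6) appends = new marks, counted over E
      ∧ (l.foldl (pvStepA curr) (c, q)).2.length
            + E.countP (fun t => (l.foldl (pvStepA curr) (c, q)).1.getD t 0 == 0)
          = q.length + E.countP (fun t => c.getD t 0 == 0) := by
  intro l
  induction l with
  | nil =>
    intro c q _
    exact ⟨fun x hx => hx, fun t ht => ht, fun t ht => Or.inl ht,
           by simp, fun x hx => Or.inl hx, rfl⟩
  | cons w l ih =>
    intro c q hl
    simp only [List.foldl_cons]
    rcases pvStepA_cases curr c q w with ⟨heq, hcond⟩ | ⟨hw, hinc, x, hx, heq⟩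
    · rw [heq]
      obtain ⟨ih1, ih2, ih3, ih4, ih5, ih6⟩ :=
        ih c q (fun u hu hum => hl u (List.mem_cons_of_mem _ hu) hum)
      refine ⟨ih1, ih2, ?_, ?_, ?_, ih6⟩
      · intro t ht
        rcases ih3 t ht with h | ⟨h1, h2, h3, h4, h5⟩
        · exact Or.inl h
        · exact Or.inr ⟨List.mem_cons_of_mem _ h1, h2, h3, h4, h5⟩
      · intro u hu hincu
        rcases List.mem_cons.1 hu with rfl | hu'
        · rcases hcond with ⟨hne0, hne1⟩ | hm
          · rcases hincu with h | h
            · exact absurd h hne0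
            · exact absurd h hne1
          · exact ih2 _ hm
        · exact ih4 u hu' hincu
      · intro x' hx'
        rcases ih5 x' hx' with h | ⟨t, h1, h2, h3, h4, h5⟩
        · exact Or.inl h
        · exact Or.inr ⟨t, h1, h2, List.mem_cons_of_mem _ h3, h4, h5⟩
    · rw [heq]
      have hl' : ∀ u ∈ l, (c.insert w 1).getD u 0 = 0 → u ∈ E := by
        intro u hu hum
        rw [PySem.Dict.getD_insert] at hum
        by_cases huw : u = w
        · simp [huw] at hum
        · exact hl u (List.mem_cons_of_mem _ hu) (by simpa [huw] using hum)
      obtain ⟨ih1, ih2, ih3, ih4, ih5, ih6⟩ := ih (c.insert w 1) (q ++ [x]) hl'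
      have hwE : w ∈ E := hl w List.mem_cons_self hw
      have hxq : x ∈ (l.foldl (pvStepA curr) (c.insert w 1, q ++ [x])).2 :=
        ih1 x (by simp)
      have hwmark : (l.foldl (pvStepA curr) (c.insert w 1, q ++ [x])).1.getD w 0 ≠ 0 :=
        ih2 w (by rw [PySem.Dict.getD_insert]; simp)
      have hunins : ∀ t, (c.insert w 1).getD t 0 = 0 → c.getD t 0 = 0 := by
        intro t ht
        rw [PySem.Dict.getD_insert] at ht
        by_cases htw : t = w
        · simp [htw] at ht
        · simpa [htw] using ht
      refine ⟨?_, ?_, ?_, ?_, ?_, ?_⟩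
      · exact fun x' hx' => ih1 x' (by simp [hx'])
      · intro t ht
        apply ih2
        rw [PySem.Dict.getD_insert]
        by_cases htw : t = w
        · simp [htw]
        · simpa [htw] using ht
      · intro t ht
        rcases ih3 t ht with hm | ⟨h1, h2, h3, h4, h5⟩
        · rw [PySem.Dict.getD_insert] at hm
          by_cases htw : t = w
          · subst htw
            refine Or.inr ⟨List.mem_cons_self, hinc, hw, ?_⟩
            rcases hx with ⟨rfl, he0⟩ | ⟨rfl, he1⟩
            · exact ⟨Or.inl he0, Or.inr hxq⟩
            · exact ⟨Or.inr hxq, Or.inl he1⟩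
          · exact Or.inl (by simpa [htw] using hm)
        · exact Or.inr ⟨List.mem_cons_of_mem _ h1, h2, hunins t h3, h4, h5⟩
      · intro u hu hincu
        rcases List.mem_cons.1 hu with rfl | hu'
        · exact hwmark
        · exact ih4 u hu' hincu
      · intro x' hx'
        rcases ih5 x' hx' with hq1 | ⟨t, h1, h2, h3, h4, h5⟩
        · rcases List.mem_append.1 hq1 with h | h
          · exact Or.inl h
          · have hxx : x' = x := by simpa using h
            subst hxx
            refine Or.inr ⟨w, hwmark, hw, List.mem_cons_self, hinc, ?_⟩
            rcases hx with ⟨rfl, _⟩ | ⟨rfl, _⟩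
            · exact Or.inr rfl
            · exact Or.inl rfl
        · exact Or.inr ⟨t, h1, hunins t h2, List.mem_cons_of_mem _ h3, h4, h5⟩
      · have hcount := pvCountPD_insert E c w hw
        have hcnt1 : E.count w = 1 := List.count_eq_one_of_mem hE hwE
        simp only [List.length_append, List.length_cons, List.length_nil] at ih6 ⊢
        omega

-- ---------- the invariant tying A's state to B's reach set ----------
def pvEdges (wires : List (List Int)) (ex : List Int) : List (List Int) := (pvDedup wires ex).2

def pvR (wires : List (List Int)) (ex : List Int) : PySem.Set Int :=
  pvSat (pvEdges wires ex) (PySem.Set.ofList [1])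

def pvTouch (wires : List (List Int)) (ex : List Int) (t : List Int) : Bool :=
  PySem.Set.contains (pvR wires ex) (pvE0 t) || PySem.Set.contains (pvR wires ex) (pvE1 t)

def pvInv (wires : List (List Int)) (ex : List Int) (P : List Int)
    (c : PySem.Dict (List Int) Int) (q : List Int) : Prop :=
  c.getD ex 0 ≠ 0
  ∧ (∀ x ∈ q, x ∈ pvR wires ex)
  ∧ (∀ x ∈ P, x ∈ pvR wires ex)
  ∧ ((1 : Int) ∈ P ∨ (1 : Int) ∈ q)
  ∧ (∀ t ∈ pvEdges wires ex, c.getD t 0 ≠ 0 →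
        (pvE0 t ∈ P ∨ pvE0 t ∈ q) ∧ (pvE1 t ∈ P ∨ pvE1 t ∈ q))
  ∧ (∀ t ∈ pvEdges wires ex, (pvE0 t ∈ P ∨ pvE1 t ∈ P) → c.getD t 0 ≠ 0)

theorem pvLoopA_char (wires : List (List Int)) (ex : List Int) :
    ∀ (c : PySem.Dict (List Int) Int) (q : List Int) (cnt : Int) (P : List Int),
      pvInv wires ex P c q →
      pvLoopA wires c q cnt
        = cnt + q.length
          + ((pvEdges wires ex).countP
              (fun t => (c.getD t 0 == 0) && pvTouch wires ex t) : Int) := by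
  have hEnodup : (pvEdges wires ex).Nodup := (pvDedup_spec wires ex).1
  have hEmem : ∀ t, t ∈ pvEdges wires ex ↔ t ∈ wires ∧ t ≠ ex := (pvDedup_spec wires ex).2
  have hRclosed : ∀ t ∈ pvEdges wires ex,
      (pvE0 t ∈ pvR wires ex ∨ pvE1 t ∈ pvR wires ex) →
      pvE0 t ∈ pvR wires ex ∧ pvE1 t ∈ pvR wires ex :=
    pvSat_closed (pvEdges wires ex) (PySem.Set.ofList [1])
  intro c q cnt
  induction c, q, cnt using pvLoopA.induct (wires := wires) with
  | case1 c cnt =>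
    intro P hinv
    obtain ⟨hex, hq, hP, h1, hfwd, hbwd⟩ := hinv
    have h1P : (1 : Int) ∈ P := by
      rcases h1 with h | h
      · exact h
      · simp at h
    have hRP : ∀ x ∈ pvR wires ex, x ∈ P := by
      apply pvSat_min
      · intro x hx
        have : x = 1 := by simpa [PySem.Set.ofList] using hx
        simpa [this] using h1P
      · intro t ht hS
        have hm := hbwd t ht (by rcases hS with h | h; exacts [Or.inl h, Or.inr h])
        have := hfwd t ht hm
        constructor
        · rcases this.1 with h | h
          · exact h
          · simp at h
        · rcases this.2 with h | h
          · exact h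
          · simp at h
    have hzero : (pvEdges wires ex).countP
        (fun t => (c.getD t 0 == 0) && pvTouch wires ex t) = 0 := by
      apply List.countP_eq_zero.2
      intro t ht
      simp only [Bool.and_eq_true, beq_iff_eq, not_and]
      intro hunm htouch
      have hmem : pvE0 t ∈ pvR wires ex ∨ pvE1 t ∈ pvR wires ex := by
        unfold pvTouch at htouch
        rcases Bool.or_eq_true_iff.1 htouch with h | h
        · exact Or.inl ((PySem.Set.contains_iff _ _).1 h)
        · exact Or.inr ((PySem.Set.contains_iff _ _).1 h)
      have hinP : pvE0 t ∈ P ∨ pvE1 t ∈ P := by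
        rcases hmem with h | h
        · exact Or.inl (hRP _ h)
        · exact Or.inr (hRP _ h)
      exact absurd hunm (by simpa using hbwd t ht hinP)
    rw [pvLoopA, hzero]
    simp
  | case2 c cnt curr rest st ih =>
    intro P hinv
    obtain ⟨hex, hq, hP, h1, hfwd, hbwd⟩ := hinv
    have hcurrR : curr ∈ pvR wires ex := hq curr List.mem_cons_self
    have hlE : ∀ w ∈ wires, c.getD w 0 = 0 → w ∈ pvEdges wires ex := by
      intro w hw hum
      refine (hEmem w).2 ⟨hw, ?_⟩
      intro hwex
      rw [hwex] at hum
      exact hex hum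
    obtain ⟨f1, f2, f3, f4, f5, f6⟩ :=
      pvFoldA_spec curr (pvEdges wires ex) hEnodup wires c rest hlE
    have hst : st = wires.foldl (pvStepA curr) (c, rest) := by
      simp only [st, List.foldl_attach]
    rw [hst] at ih
    set F := wires.foldl (pvStepA curr) (c, rest) with hF
    have hnewtouch : ∀ t ∈ pvEdges wires ex, c.getD t 0 = 0 → F.1.getD t 0 ≠ 0 →
        pvTouch wires ex t = true := by
      intro t ht h0 hm
      rcases f3 t hm with h | ⟨_, hincid, _, _, _⟩
      · exact absurd h (by simp [h0])
      · unfold pvTouch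
        rcases hincid with h | h
        · rw [h]
          simpa using Or.inl hcurrR
        · rw [h]
          simpa using Or.inr hcurrR
    have hinv' : pvInv wires ex (P ++ [curr]) F.1 F.2 := by
      refine ⟨f2 ex hex, ?_, ?_, ?_, ?_, ?_⟩
      · intro x hx
        rcases f5 x hx with hxr | ⟨t, hm, h0, htw, hincid, hxe⟩
        · exact hq x (List.mem_cons_of_mem _ hxr)
        · have htE : t ∈ pvEdges wires ex := hlE t htw h0
          have htouch : pvE0 t ∈ pvR wires ex ∨ pvE1 t ∈ pvR wires ex := by
            rcases hincid with h | h
            · exact Or.inl (h ▸ hcurrR)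
            · exact Or.inr (h ▸ hcurrR)
          have hboth := hRclosed t htE htouch
          rcases hxe with rfl | rfl
          · exact hboth.1
          · exact hboth.2
      · intro x hx
        rcases List.mem_append.1 hx with h | h
        · exact hP x h
        · have hxc : x = curr := by simpa using h
          exact hxc ▸ hcurrR
      · rcases h1 with h | h
        · exact Or.inl (List.mem_append.2 (Or.inl h))
        · rcases List.mem_cons.1 h with h | h
          · exact Or.inl (List.mem_append.2 (Or.inr (by simp [h])))
          · exact Or.inr (f1 _ h)
      · intro t ht hm
        rcases f3 t hm with hmc | ⟨_, _, _, h4, h5⟩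
        · have hends := hfwd t ht hmc
          constructor
          · rcases hends.1 with h | h
            · exact Or.inl (List.mem_append.2 (Or.inl h))
            · rcases List.mem_cons.1 h with h | h
              · exact Or.inl (List.mem_append.2 (Or.inr (by simp [h])))
              · exact Or.inr (f1 _ h)
          · rcases hends.2 with h | h
            · exact Or.inl (List.mem_append.2 (Or.inl h))
            · rcases List.mem_cons.1 h with h | h
              · exact Or.inl (List.mem_append.2 (Or.inr (by simp [h])))
              · exact Or.inr (f1 _ h)
        · constructor
          · rcases h4 with h | h
            · exact Or.inl (List.mem_append.2 (Or.inr (by simp [h])))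
            · exact Or.inr h
          · rcases h5 with h | h
            · exact Or.inl (List.mem_append.2 (Or.inr (by simp [h])))
            · exact Or.inr h
      · intro t ht hPmem
        have htw : t ∈ wires := ((hEmem t).1 ht).1
        rcases hPmem with h | h
        · rcases List.mem_append.1 h with h' | h'
          · exact f2 t (hbwd t ht (Or.inl h'))
          · have he : pvE0 t = curr := by simpa using h'
            exact f4 t htw (Or.inl he)
        · rcases List.mem_append.1 h with h' | h'
          · exact f2 t (hbwd t ht (Or.inr h'))
          · have he : pvE1 t = curr := by simpa using h'
            exact f4 t htw (Or.inr he)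
    have hstep : pvLoopA wires c (curr :: rest) cnt = pvLoopA wires F.1 F.2 (cnt + 1) := by
      rw [pvLoopA]
    rw [hstep, ih (P ++ [curr]) hinv']
    have himp : ∀ t ∈ pvEdges wires ex,
        (F.1.getD t 0 == 0) = true → (c.getD t 0 == 0) = true := by
      intro t _ h
      by_contra hc
      simp only [beq_iff_eq] at h hc
      exact (f2 t hc) (by simp [h])
    have himpT : ∀ t ∈ pvEdges wires ex,
        ((F.1.getD t 0 == 0) && pvTouch wires ex t) = true →
        ((c.getD t 0 == 0) && pvTouch wires ex t) = true := by
      intro t ht h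
      rcases Bool.and_eq_true_iff.1 h with ⟨h1', h2'⟩
      exact Bool.and_eq_true_iff.2 ⟨himp t ht h1', h2'⟩
    have hs1 := pvCountP_split (pvEdges wires ex)
      (fun t => (c.getD t 0 == 0)) (fun t => (F.1.getD t 0 == 0)) himp
    have hs2 := pvCountP_split (pvEdges wires ex)
      (fun t => (c.getD t 0 == 0) && pvTouch wires ex t)
      (fun t => (F.1.getD t 0 == 0) && pvTouch wires ex t) himpT
    beta_reduce at hs1 hs2
    have hcong : (pvEdges wires ex).countP
          (fun t => ((c.getD t 0 == 0) && pvTouch wires ex t)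
            && !((F.1.getD t 0 == 0) && pvTouch wires ex t))
        = (pvEdges wires ex).countP
          (fun t => (c.getD t 0 == 0) && !(F.1.getD t 0 == 0)) := by
      apply List.countP_congr
      intro t ht
      cases hp : (c.getD t 0 == 0) <;> cases hp' : (F.1.getD t 0 == 0) <;>
        simp [hp, hp']
      exact hnewtouch t ht (by simpa using hp) (by simpa using hp')
    rw [hcong] at hs2
    simp only [List.length_cons]
    omega

-- ===== VERDICT (by name: the statement is the Claim_ definition above) =====
theorem bfs_spec : Claim_equal_bfs := by
  unfold Claim_equal_bfs
  intro wires ex _ _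
  unfold Spec_bfs
  have hEmem := (pvDedup_spec wires ex).2
  have h1R : (1 : Int) ∈ pvR wires ex :=
    pvSat_subset (pvEdges wires ex) (PySem.Set.ofList [1]) 1 (by simp [PySem.Set.ofList])
  have hinv : pvInv wires ex [] (PySem.Dict.empty.insert ex 1) [1] := by
    refine ⟨?_, ?_, ?_, ?_, ?_, ?_⟩
    · rw [PySem.Dict.getD_insert_self]
      norm_num
    · intro x hx
      have hx1 : x = 1 := by simpa using hx
      exact hx1 ▸ h1R
    · intro x hx
      simp at hx
    · exact Or.inr (by simp)
    · intro t ht hm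
      exfalso
      have htne : t ≠ ex := ((hEmem t).1 ht).2
      rw [PySem.Dict.getD_insert] at hm
      simp [htne, PySem.Dict.getD_empty] at hm
    · intro t ht hmem
      simp at hmem
  have hchar := pvLoopA_char wires ex (PySem.Dict.empty.insert ex 1) [1] 0 [] hinv
  show bfs wires ex = bfs_alt wires ex
  rw [bfs, hchar]
  have hcong : (pvEdges wires ex).countP
      (fun t => (((PySem.Dict.empty.insert ex 1 : PySem.Dict (List Int) Int)).getD t 0 == 0)
        && pvTouch wires ex t)
      = (pvEdges wires ex).countP (fun t => pvTouch wires ex t) := by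
    apply List.countP_congr
    intro t ht
    have htne : t ≠ ex := ((hEmem t).1 ht).2
    rw [PySem.Dict.getD_insert]
    simp [htne, PySem.Dict.getD_empty]
  rw [hcong]
  simp only [bfs_alt]
  unfold pvTouch pvR pvEdges
  simp only [List.length_singleton]
  omega
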